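-- pv_equiv track=rewrite | github.com/SamuelGong/hey | hey/utils/misc.py | _find_balanced_region
-- ===== SOURCE A (Python) =====
-- def _find_balanced_region(s: str, start: int):
--     """Return (lo, hi) for the balanced JSON region starting at start, or None."""
--     pair = {'{': '}', '[': ']'}
--     opener = s[start]
--     if opener not in pair:
--         return None
--     closer = pair[opener]
--     stack = [closer]
--     i = start + 1
--     n = len(s)
--     while i < n:
--         ch = s[i]
--         # IMPORTANT: do NOT try to track quotes here (pre-sanitization may be invalid).
--         if ch in pair:                 # new nested object/array
--             stack.append(pair[ch])
--         elif ch in (']', '}'):         # possible close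
--             if not stack or ch != stack[-1]:
--                 return None            # mismatched -> not a valid JSON region
--             stack.pop()
--             if not stack:
--                 return (start, i + 1)  # inclusive end
--         i += 1
--     return None                        # ran out before closing
-- ===== SOURCE B (Python) =====
-- def _find_balanced_region(s: str, start: int):
--     """Return (lo, hi) for the balanced JSON region starting at start, or None."""
--     pair = {'{': '}', '[': ']'}
--     opener = s[start]
--     if opener not in pair:
--         return None
--
--     def parse(i):
--         # assumes s[i] is an opener; returns index just past its matching closer, or None
--         closer = pair[s[i]]
--         j = i + 1
--         while j < len(s):
--             ch = s[j]
--             if ch in pair: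
--                 j = parse(j)          # recurse on the nested region, continue after it
--                 if j is None:
--                     return None
--             elif ch in (']', '}'):
--                 return j + 1 if ch == closer else None
--             else:
--                 j += 1
--         return None
--
--     end = parse(start)
--     return None if end is None else (start, end)
-- ===== Notes on version B (the rewrite author's own statement) =====
-- stated objective: alternative
-- what changed: Replaces the explicit closer-stack while-loop with a recursive-descent matcher whose recursion depth equals the bracket nesting depth (no stack list is maintained).
import Mathlib
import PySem

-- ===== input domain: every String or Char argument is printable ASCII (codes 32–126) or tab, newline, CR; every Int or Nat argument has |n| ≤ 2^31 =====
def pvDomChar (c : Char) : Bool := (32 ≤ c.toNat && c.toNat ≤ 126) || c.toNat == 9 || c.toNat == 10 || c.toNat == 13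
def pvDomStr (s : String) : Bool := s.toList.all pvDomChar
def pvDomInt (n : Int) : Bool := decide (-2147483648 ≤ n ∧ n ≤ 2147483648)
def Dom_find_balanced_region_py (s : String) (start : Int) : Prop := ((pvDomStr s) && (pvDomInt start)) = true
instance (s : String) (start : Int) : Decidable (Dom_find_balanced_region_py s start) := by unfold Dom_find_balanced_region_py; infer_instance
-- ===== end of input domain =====

-- B replaces A's explicit closer-stack loop with a recursive-descent matcher (recursion on nesting);
-- equal return values proved on Pre_ (start a valid Python index). In Python, B's recursion depth is the
-- bracket nesting depth, so extremely deep nesting could hit the recursion limit where A's loop does not.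

-- ===== PORT A =====
-- pair lookup 'pair[ch]' / membership 'ch in pair'
def pvPairOf (c : Char) : Option Char :=
  if c = '{' then some '}' else if c = '[' then some ']' else none

-- A's while-loop: stack of expected closers, top at the head (Python's stack[-1]/append/pop)
def pvLoopA (cs : List Char) (start : Int) (stack : List Char) (i : Int) : Option (Int × Int) :=
  if i < (cs.length : Int) then
    match PySem.List.pyGet? cs i with
    | none => none   -- IndexError (unreachable for -len ≤ start)
    | some ch =>
      match pvPairOf ch with
      | some cl => pvLoopA cs start (cl :: stack) (i + 1)
      | none =>
        if ch = ']' ∨ ch = '}' then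
          match stack with
          | [] => none
          | top :: rest =>
            if ch ≠ top then none
            else if rest = [] then some (start, i + 1)
            else pvLoopA cs start rest (i + 1)
        else pvLoopA cs start stack (i + 1)
  else none
termination_by ((cs.length : Int) - i).toNat
decreasing_by all_goals omega

def find_balanced_region_py (s : String) (start : Int) : Option (Int × Int) :=
  match PySem.List.pyGet? s.toList start with
  | none => none   -- IndexError in Python; excluded by Pre_
  | some opener =>
    match pvPairOf opener with
    | none => none
    | some closer => pvLoopA s.toList start [closer] (start + 1)

-- ===== PORT B =====
-- Source B's parse(i) inlined one step: pvScanB is the scanning while-loop of parse, holding parse's closer;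
-- a nested opener recurses (parse(j)) and continues from its result. fuel is a totality guard only
-- (every call strictly advances the position, so 2*len+1 is always enough; proved below).
def pvScanB (fuel : Nat) (cs : List Char) (closer : Char) (j : Int) : Option Int :=
  match fuel with
  | 0 => none
  | fuel + 1 =>
    if j < (cs.length : Int) then
      match PySem.List.pyGet? cs j with
      | none => none   -- IndexError (unreachable for in-range start)
      | some ch =>
        match pvPairOf ch with
        | some cl =>     -- nested region: recurse, then continue after it
          match pvScanB fuel cs cl (j + 1) with
          | none => none
          | some k => pvScanB fuel cs closer k
        | none =>
          if ch = ']' ∨ ch = '}' then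
            if ch = closer then some (j + 1) else none
          else pvScanB fuel cs closer (j + 1)
    else none

def find_balanced_region_py_alt (s : String) (start : Int) : Option (Int × Int) :=
  match PySem.List.pyGet? s.toList start with
  | none => none   -- IndexError in Python; excluded by Pre_
  | some opener =>
    match pvPairOf opener with
    | none => none
    | some closer =>
      match pvScanB (2 * s.toList.length + 1) s.toList closer (start + 1) with
      | none => none
      | some k => some (start, k)

-- ===== PRECONDITION & SPEC =====
-- Pre_ excludes exactly the starts outside Python's index range, where A raises IndexError.
def Pre_find_balanced_region_py (s : String) (start : Int) : Prop :=
  -(s.toList.length : Int) ≤ start ∧ start < (s.toList.length : Int)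
instance (s : String) (start : Int) : Decidable (Pre_find_balanced_region_py s start) := by
  unfold Pre_find_balanced_region_py; infer_instance

def pvWitness_find_balanced_region_py : String × Int := ("{\"a\": [1]}", 0)

def Spec_find_balanced_region_py (s : String) (start : Int) (out : Option (Int × Int)) : Prop := out = find_balanced_region_py_alt s start
instance (s : String) (start : Int) (out : Option (Int × Int)) : Decidable (Spec_find_balanced_region_py s start out) := by unfold Spec_find_balanced_region_py; infer_instance

-- ===== CLAIM (what is proved, stated in full; the proofs are below) =====
def Claim_equal_find_balanced_region_py : Prop := ∀ (s : String) (start : Int), Dom_find_balanced_region_py s start → Pre_find_balanced_region_py s start → Spec_find_balanced_region_py s start (find_balanced_region_py s start)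

-- ===== LEMMAS AND PROOFS =====

-- the scanner strictly advances the position
lemma pvScanB_lt : ∀ (fuel : Nat) (cs : List Char) (c : Char) (j k : Int),
    pvScanB fuel cs c j = some k → j < k := by
  intro fuel
  induction fuel with
  | zero => intro cs c j k h; simp [pvScanB] at h
  | succ f ih =>
    intro cs c j k h
    unfold pvScanB at h
    by_cases hj : j < (cs.length : Int)
    · rw [if_pos hj] at h
      cases hg : PySem.List.pyGet? cs j with
      | none => rw [hg] at h; exact absurd h (by simp)
      | some ch =>
        rw [hg] at h; dsimp only at h
        cases hp : pvPairOf ch with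
        | some cl =>
          rw [hp] at h; dsimp only at h
          cases h1 : pvScanB f cs cl (j + 1) with
          | none => rw [h1] at h; exact absurd h (by simp)
          | some k1 =>
            rw [h1] at h; dsimp only at h
            have := ih cs cl (j + 1) k1 h1
            have := ih cs c k1 k h
            omega
        | none =>
          rw [hp] at h; dsimp only at h
          split at h
          · split at h
            · simp at h; omega
            · simp at h
          · have := ih cs c (j + 1) k h
            omega
    · rw [if_neg hj] at h; exact absurd h (by simp)

-- main correspondence: A's stack loop equals B's scanner followed by the rest of the stack
lemma pvLoop_eq_scan : ∀ (m : Nat) (cs : List Char) (start : Int) (i : Int) (c : Char)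
    (rest : List Char) (f : Nat),
    ((cs.length : Int) - i).toNat < m → ((cs.length : Int) - i).toNat < f →
    pvLoopA cs start (c :: rest) i =
      (match pvScanB f cs c i with
       | none => none
       | some k =>
         match rest with
         | [] => some (start, k)
         | c' :: rest' => pvLoopA cs start (c' :: rest') k) := by
  intro m
  induction m with
  | zero => intro _ _ _ _ _ _ h; omega
  | succ m ih =>
    intro cs start i c rest f hm hf
    obtain ⟨a, rfl⟩ : ∃ a, f = a + 1 := ⟨f - 1, by omega⟩
    conv_lhs => rw [pvLoopA]
    simp only [pvScanB]
    by_cases hj : i < (cs.length : Int)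
    · rw [if_pos hj, if_pos hj]
      cases hg : PySem.List.pyGet? cs i with
      | none => rfl
      | some ch =>
        dsimp only
        cases hp : pvPairOf ch with
        | some cl =>
          dsimp only
          have e1 := ih cs start (i + 1) cl (c :: rest) a (by omega) (by omega)
          dsimp only at e1
          rw [e1]
          cases hk : pvScanB a cs cl (i + 1) with
          | none => rfl
          | some k1 =>
            dsimp only
            have hlt := pvScanB_lt a cs cl (i + 1) k1 hk
            exact ih cs start k1 c rest a (by omega) (by omega)
        | none =>
          dsimp only
          by_cases hcl : ch = ']' ∨ ch = '}'
          · rw [if_pos hcl, if_pos hcl]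
            by_cases hc : ch = c
            · subst hc
              simp only [ne_eq, not_true_eq_false, if_false]
              cases rest with
              | nil => simp
              | cons c' rest' => simp
            · simp [hc]
          · rw [if_neg hcl, if_neg hcl]
            exact ih cs start (i + 1) c rest a (by omega) (by omega)
    · rw [if_neg hj, if_neg hj]

-- ===== VERDICT (by name: the statement is the Claim_ definition above) =====
theorem find_balanced_region_py_spec : Claim_equal_find_balanced_region_py := by
  intro s start _ hpre
  unfold Spec_find_balanced_region_py find_balanced_region_py find_balanced_region_py_alt
  obtain ⟨hlo, hhi⟩ := hpre
  cases hg : PySem.List.pyGet? s.toList start with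
  | none => rfl
  | some opener =>
    dsimp only
    cases hp : pvPairOf opener with
    | none => rfl
    | some closer =>
      dsimp only
      rw [pvLoop_eq_scan (((s.toList.length : Int) - (start + 1)).toNat + 1) s.toList start
          (start + 1) closer [] (2 * s.toList.length + 1) (by omega) (by omega)]
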